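-- pv_equiv track=rewrite | github.com/4page-agency/kalkulator_rekruso | kalkulator/printing.py | _pdf_escape_text
-- ===== SOURCE A (Python) =====
-- import unicodedata
--
-- def _pdf_escape_text(text: str) -> str:
--     normalized = unicodedata.normalize("NFKD", text)
--     filtered = []
--     for char in normalized:
--         if unicodedata.combining(char):
--             continue
--         if 32 <= ord(char) <= 126:
--             filtered.append(char)
--         elif char == "\t":
--             filtered.append("    ")
--         else:
--             continue
--     escaped = "".join(filtered)
--     escaped = escaped.replace("\\", "\\\\")
--     escaped = escaped.replace("(", "\\(")
--     escaped = escaped.replace(")", "\\)")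
--     return escaped
-- ===== SOURCE B (Python) =====
-- import unicodedata
--
-- def _pdf_escape_text(text: str) -> str:
--     out = []
--     for ch in unicodedata.normalize("NFKD", text):
--         if unicodedata.combining(ch):
--             continue
--         if ch == "\\":
--             out.append("\\\\")
--         elif ch == "(":
--             out.append("\\(")
--         elif ch == ")":
--             out.append("\\)")
--         elif 32 <= ord(ch) <= 126:
--             out.append(ch)
--         elif ch == "\t":
--             out.append("    ")
--     return "".join(out)
-- ===== Notes on version B (the rewrite author's own statement) =====
-- stated objective: simpler
-- what changed: Replaced the filter-pass-then-three-whole-string-replace-scans with a single loop that appends each character's fully escaped form inline and joins once.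
import Mathlib
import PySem

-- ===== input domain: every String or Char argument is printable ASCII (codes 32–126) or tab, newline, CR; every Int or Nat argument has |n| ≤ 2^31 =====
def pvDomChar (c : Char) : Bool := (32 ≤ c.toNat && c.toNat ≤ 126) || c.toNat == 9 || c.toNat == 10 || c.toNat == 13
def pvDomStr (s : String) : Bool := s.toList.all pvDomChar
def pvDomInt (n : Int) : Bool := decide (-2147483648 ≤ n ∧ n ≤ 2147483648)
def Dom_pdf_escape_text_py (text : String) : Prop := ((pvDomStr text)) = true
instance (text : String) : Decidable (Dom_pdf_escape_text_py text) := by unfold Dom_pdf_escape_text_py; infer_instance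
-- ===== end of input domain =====

-- B replaces A's filter pass plus three whole-string replace scans by one loop that
-- appends each kept character's fully escaped form inline and joins once (objective: simpler).

-- ===== PORT A =====
-- one step of A's filter loop (the `unicodedata.combining` test is always false on the
-- printable-ASCII/tab/newline/CR domain, so the `continue` for combining marks never fires)
def pdfFilterStep (acc : List String) (c : Char) : List String :=
  if 32 ≤ c.toNat ∧ c.toNat ≤ 126 then acc ++ [String.ofList [c]]
  else if c = '\t' then acc ++ ["    "]
  else acc

def pdf_escape_text_py (text : String) : String :=
  -- NFKD normalization is the identity on the printable-ASCII/tab/newline/CR domain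
  let normalized := text
  let filtered := normalized.toList.foldl pdfFilterStep []
  let escaped := PySem.Str.join "" filtered
  let escaped := PySem.Str.replace escaped "\\" "\\\\"
  let escaped := PySem.Str.replace escaped "(" "\\("
  let escaped := PySem.Str.replace escaped ")" "\\)"
  escaped

-- ===== PORT B =====
-- B's per-character escaped form (NFKD / combining: identity / always false, as above)
def pdfEscChar (c : Char) : List Char :=
  if c = '\\' then ['\\', '\\']
  else if c = '(' then ['\\', '(']
  else if c = ')' then ['\\', ')']
  else if 32 ≤ c.toNat ∧ c.toNat ≤ 126 then [c]
  else if c = '\t' then [' ', ' ', ' ', ' ']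
  else []

def pdf_escape_text_py_alt (text : String) : String :=
  String.ofList (text.toList.flatMap pdfEscChar)

-- ===== PRECONDITION & SPEC =====
def Spec_pdf_escape_text_py (text : String) (out : String) : Prop := out = pdf_escape_text_py_alt text
instance (text : String) (out : String) : Decidable (Spec_pdf_escape_text_py text out) := by unfold Spec_pdf_escape_text_py; infer_instance

-- ===== CLAIM (what is proved, stated in full; the proofs are below) =====
def Claim_equal_pdf_escape_text_py : Prop := ∀ (text : String), Dom_pdf_escape_text_py text → Spec_pdf_escape_text_py text (pdf_escape_text_py text)

-- ===== LEMMAS AND PROOFS =====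

-- replacing a single-character pattern is a per-character flatMap
def escAt (a : Char) (new : List Char) (c : Char) : List Char :=
  if c = a then new else [c]

theorem replace_go_single (a : Char) (new : List Char) :
    ∀ (fuel : Nat) (l acc : List Char), l.length ≤ fuel →
      PySem.Chars.replace.go [a] new fuel l acc
        = acc.reverse ++ l.flatMap (escAt a new) := by
  intro fuel
  induction fuel with
  | zero =>
    intro l acc h
    have : l = [] := List.eq_nil_of_length_eq_zero (Nat.le_zero.mp h)
    subst this
    simp [PySem.Chars.replace.go]
  | succ n ih =>
    intro l acc h
    cases l with
    | nil => simp [PySem.Chars.replace.go]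
    | cons c t =>
      by_cases hc : c = a
      · subst hc
        have hpre : List.isPrefixOf [c] (c :: t) = true := by
          simp [List.isPrefixOf]
        simp only [PySem.Chars.replace.go, hpre, if_true]
        have hd : List.drop [c].length (c :: t) = t := by simp
        rw [hd, ih t (new.reverse ++ acc) (Nat.le_of_succ_le_succ h)]
        simp [escAt, List.flatMap_cons]
      · have hpre : List.isPrefixOf [a] (c :: t) = false := by
          simp [List.isPrefixOf]
          intro hac; exact absurd hac.symm hc
        simp only [PySem.Chars.replace.go, hpre]
        rw [ih t (c :: acc) (Nat.le_of_succ_le_succ h)]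
        simp [escAt, hc, List.flatMap_cons]

theorem replace_single (a : Char) (new s : List Char) :
    PySem.Chars.replace s [a] new = s.flatMap (escAt a new) := by
  have h := replace_go_single a new s.length s [] (le_refl _)
  simpa [PySem.Chars.replace] using h

theorem flatten_flatMap_chars (cs : List Char) (g : Char → List (List Char)) :
    (cs.flatMap g).flatten = cs.flatMap (fun c => (g c).flatten) := by
  induction cs with
  | nil => simp
  | cons c t ih => simp [List.flatMap_cons, ih]

-- `"".join` on lists of characters is flatten
theorem join_nil_flatten (xss : List (List Char)) :
    PySem.Chars.join [] xss = xss.flatten := by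
  unfold PySem.Chars.join List.intercalate
  induction xss with
  | nil => simp
  | cons x t ih =>
    cases t with
    | nil => simp
    | cons y u => simpa [List.intersperse] using ih

-- A's filter pass, characterised: the pieces each char contributes
def pdfPiece (c : Char) : List String :=
  if 32 ≤ c.toNat ∧ c.toNat ≤ 126 then [String.ofList [c]]
  else if c = '\t' then ["    "]
  else []

theorem foldl_filterStep (cs : List Char) :
    ∀ acc, cs.foldl pdfFilterStep acc = acc ++ cs.flatMap pdfPiece := by
  induction cs with
  | nil => intro acc; simp
  | cons c t ih =>
    intro acc
    simp only [List.foldl_cons, List.flatMap_cons, ih, pdfFilterStep, pdfPiece]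
    split_ifs <;> simp

-- the char-level pieces of A's filter
def pdfPieceChars (c : Char) : List Char :=
  if 32 ≤ c.toNat ∧ c.toNat ≤ 126 then [c]
  else if c = '\t' then [' ', ' ', ' ', ' ']
  else []

theorem piece_toList (c : Char) :
    ((pdfPiece c).map String.toList).flatten = pdfPieceChars c := by
  unfold pdfPiece pdfPieceChars
  split_ifs <;> simp [String.toList_ofList]

-- per-character: A's three escape scans applied to a filtered piece give B's escaped form
theorem escape_chain_char (c : Char) :
    (((pdfPieceChars c).flatMap (escAt '\\' ['\\', '\\'])).flatMap
        (escAt '(' ['\\', '('])).flatMap (escAt ')' ['\\', ')']) = pdfEscChar c := by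
  unfold pdfPieceChars pdfEscChar escAt
  by_cases h1 : c = '\\'
  · subst h1; decide
  · by_cases h2 : c = '('
    · subst h2; decide
    · by_cases h3 : c = ')'
      · subst h3; decide
      · by_cases h4 : 32 ≤ c.toNat ∧ c.toNat ≤ 126
        · simp [h1, h2, h3, h4]
        · by_cases h5 : c = '\t'
          · subst h5; decide
          · simp [h1, h2, h3, h4, h5]

-- ===== VERDICT (by name: the statement is the Claim_ definition above) =====
theorem pdf_escape_text_py_spec : Claim_equal_pdf_escape_text_py := by
  intro text _
  unfold Spec_pdf_escape_text_py pdf_escape_text_py pdf_escape_text_py_alt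
  have htl :
      (PySem.Str.replace
          (PySem.Str.replace
            (PySem.Str.replace (PySem.Str.join "" (text.toList.foldl pdfFilterStep []))
              "\\" "\\\\") "(" "\\(") ")" "\\)").toList
        = text.toList.flatMap pdfEscChar := by
    simp only [PySem.Str.toList_replace, PySem.Str.toList_join]
    have hjoin :
        PySem.Chars.join "".toList
            ((text.toList.foldl pdfFilterStep []).map String.toList)
          = text.toList.flatMap pdfPieceChars := by
      have : ("" : String).toList = [] := rfl
      rw [this, join_nil_flatten, foldl_filterStep, List.nil_append,
        List.map_flatMap, flatten_flatMap_chars]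
      exact List.flatMap_congr (fun c _ => piece_toList c)
    have e1 : ("\\" : String).toList = ['\\'] := rfl
    have e1' : ("\\\\" : String).toList = ['\\', '\\'] := rfl
    have e2 : ("(" : String).toList = ['('] := rfl
    have e2' : ("\\(" : String).toList = ['\\', '('] := rfl
    have e3 : (")" : String).toList = [')'] := rfl
    have e3' : ("\\)" : String).toList = ['\\', ')'] := rfl
    rw [hjoin, e1, e1', e2, e2', e3, e3',
      replace_single, replace_single, replace_single]
    simp only [List.flatMap_assoc]
    exact List.flatMap_congr (fun c _ => by
      simpa only [List.flatMap_assoc] using escape_chain_char c)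
  rw [← htl]
  exact String.ofList_toList.symm
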